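-- pv_equiv track=rewrite | github.com/greggelong/ebot | pythonEbots/simpleElizaBot.py | generate_why_question
-- ===== SOURCE A (Python) =====
-- def generate_why_question(response):
--     # split into a list
--     rlist = response.lower().strip().split()
--     #check for refering to bot, as it is difficult to replace I to you and then you to me
--     refertobot = ["you","yours"]
--     for i in refertobot:
--         if i in rlist:
--             return "Please don't bring me into this.  I am concerned with you."
--     #check for questions words in interogative positions only
--     qwords = ["do","what", "how","why","when"]
--     for i in qwords:
--         if i in rlist[0]:
--             return "I am asking the questions here!!!"
--
--     replaceit = {
--         "i":"you",
--         "am":"are",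
--         "me":"you",
--         "mine":"yours",
--         "my":"your",
--         "myself":"yourself",
--         "because": "",
--         }
--     for word in replaceit.keys():
--         # use list comprehension
--         rlist = [replaceit.get(word) if item == word else item for item in rlist]
--     # list to string
--     resultPart = " ".join(rlist)
--     return f"Why do you think {resultPart.strip()}?" # the you is already .strip to take out white space from because
-- ===== SOURCE B (Python) =====
-- _REPLACE = {
--     "i": "you",
--     "am": "are",
--     "me": "you",
--     "mine": "yours",
--     "my": "your",
--     "myself": "yourself",
--     "because": "",
-- }
--
--
-- def _mentions_bot(words):
--     # recursive scan of the words against the two bot pronouns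
--     if not words:
--         return False
--     return words[0] in ("you", "yours") or _mentions_bot(words[1:])
--
--
-- def _starts_question(qwords, first):
--     # recursive scan of the question words against the first word
--     if not qwords:
--         return False
--     return qwords[0] in first or _starts_question(qwords[1:], first)
--
--
-- def _rewritten(words):
--     # build the reflected sentence directly, one word at a time
--     head = _REPLACE.get(words[0], words[0])
--     if len(words) == 1:
--         return head
--     return head + " " + _rewritten(words[1:])
--
--
-- def generate_why_question(response):
--     words = response.lower().strip().split()
--     if _mentions_bot(words):
--         return "Please don't bring me into this.  I am concerned with you."
--     if _starts_question(["do", "what", "how", "why", "when"], words[0]):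
--         return "I am asking the questions here!!!"
--     return "Why do you think " + _rewritten(words).strip() + "?"
-- ===== Notes on version B (the rewrite author's own statement) =====
-- stated objective: alternative
-- what changed: A's seven sequential whole-list replacement passes plus a final join are replaced by a single recursive builder that emits each word's replacement and the separators directly while walking the list once, and both guard scans become structural recursions over the words / keyword list instead of keyword-outer membership loops.
import Mathlib
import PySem

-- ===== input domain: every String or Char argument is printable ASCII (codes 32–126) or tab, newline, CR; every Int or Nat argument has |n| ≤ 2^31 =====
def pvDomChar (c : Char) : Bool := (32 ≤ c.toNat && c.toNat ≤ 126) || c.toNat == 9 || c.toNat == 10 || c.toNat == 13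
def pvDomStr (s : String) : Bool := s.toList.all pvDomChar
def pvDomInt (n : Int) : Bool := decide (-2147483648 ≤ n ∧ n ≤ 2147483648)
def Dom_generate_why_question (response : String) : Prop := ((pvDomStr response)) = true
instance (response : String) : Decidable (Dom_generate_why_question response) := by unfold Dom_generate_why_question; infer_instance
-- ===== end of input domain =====

-- B replaces A's seven whole-list replacement passes and final join by one recursive
-- builder emitting replacement words and separators in a single walk, and replaces both
-- keyword-outer guard loops by structural recursions (alternative decomposition, same cost).


-- ===== PORT A =====
-- replaceit, A's dict literal (insertion order)
def pvReplA : List (String × String) :=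
  [("i","you"),("am","are"),("me","you"),("mine","yours"),("my","your"),("myself","yourself"),("because","")]

def generate_why_question (response : String) : String :=
  let rlist := PySem.Str.split₀ (PySem.Str.strip (PySem.Str.lower response))
  if (["you","yours"].any fun i => rlist.contains i) then
    "Please don't bring me into this.  I am concerned with you."
  else
    match PySem.List.pyGet? rlist 0 with
    | none => ""   -- IndexError on rlist[0]; excluded by Pre_
    | some first =>
      if (["do","what","how","why","when"].any fun i => PySem.Str.isIn i first) then
        "I am asking the questions here!!!"
      else
        -- for word in replaceit.keys(): rlist = [replaceit.get(word) if item == word else item for item in rlist]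
        let rlist' := pvReplA.foldl
          (fun acc kv => acc.map fun item => if item == kv.1 then kv.2 else item) rlist
        let resultPart := PySem.Str.join " " rlist'
        PySem.Str.join "" ["Why do you think ", PySem.Str.strip resultPart, "?"]

-- ===== PORT B =====
-- _REPLACE, B's dict literal
def pvReplB : PySem.Dict String String :=
  ⟨[("i","you"),("am","are"),("me","you"),("mine","yours"),("my","your"),("myself","yourself"),("because","")]⟩

-- _mentions_bot(words): recursive scan against the two bot pronouns
def pvMentionsBot : List String → Bool
  | [] => false
  | w :: ws => w == "you" || w == "yours" || pvMentionsBot ws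

-- _starts_question(qwords, first): recursive scan of the question words
def pvStartsQuestion (first : String) : List String → Bool
  | [] => false
  | q :: qs => PySem.Str.isIn q first || pvStartsQuestion first qs

-- _rewritten(words): build the reflected sentence one word at a time
-- ([] case is unreachable in B: _rewritten is only called on a nonempty word list)
def pvRewritten : List String → String
  | [] => ""
  | [w] => PySem.Dict.getD pvReplB w w
  | w :: rest => PySem.Str.join "" [PySem.Dict.getD pvReplB w w, " ", pvRewritten rest]

def generate_why_question_alt (response : String) : String :=
  let words := PySem.Str.split₀ (PySem.Str.strip (PySem.Str.lower response))
  if pvMentionsBot words then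
    "Please don't bring me into this.  I am concerned with you."
  else
    match PySem.List.pyGet? words 0 with
    | none => ""   -- IndexError on words[0]; excluded by Pre_
    | some first =>
      if pvStartsQuestion first ["do","what","how","why","when"] then
        "I am asking the questions here!!!"
      else
        PySem.Str.join "" ["Why do you think ", PySem.Str.strip (pvRewritten words), "?"]

-- ===== PRECONDITION & SPEC =====
-- Pre_ excludes exactly the all-whitespace/empty inputs: these split into no words, so A
-- raises IndexError on rlist[0] (and B raises the same way on words[0]).
def Pre_generate_why_question (response : String) : Prop :=
  (response.toList.any fun c => !PySem.Chars.isspace c) = true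
instance (response : String) : Decidable (Pre_generate_why_question response) := by
  unfold Pre_generate_why_question; infer_instance
def pvWitness_generate_why_question : String := "I am sad because tired"

def Spec_generate_why_question (response : String) (out : String) : Prop := out = generate_why_question_alt response
instance (response : String) (out : String) : Decidable (Spec_generate_why_question response out) := by unfold Spec_generate_why_question; infer_instance

-- ===== CLAIM (what is proved, stated in full; the proofs are below) =====
def Claim_equal_generate_why_question : Prop := ∀ (response : String), Dom_generate_why_question response → Pre_generate_why_question response → Spec_generate_why_question response (generate_why_question response)

-- ===== LEMMAS AND PROOFS =====

-- A's keyword-scans-list guard equals B's recursive word scan.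
theorem pvGuard (l : List String) :
    (["you","yours"].any fun i => l.contains i) = pvMentionsBot l := by
  induction l with
  | nil => rfl
  | cons x t ih =>
    by_cases h1 : x = "you"
    · subst h1; simp [pvMentionsBot]
    · by_cases h2 : x = "yours"
      · subst h2; simp [pvMentionsBot]
      · rw [show pvMentionsBot (x :: t) = pvMentionsBot t by simp [pvMentionsBot, h1, h2]]
        simpa [h1, h2, Ne.symm h1, Ne.symm h2] using ih

-- A's qwords any-loop equals B's recursive keyword scan.
theorem pvQGuard (first : String) (qs : List String) :
    (qs.any fun i => PySem.Str.isIn i first) = pvStartsQuestion first qs := by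
  induction qs with
  | nil => rfl
  | cons q t ih => simp only [List.any_cons, pvStartsQuestion, ih]

-- A's seven replacement passes give exactly the per-word getD replacement.
theorem pvFold_eq (l : List String) :
    pvReplA.foldl (fun acc kv => acc.map fun item => if item == kv.1 then kv.2 else item) l
      = l.map (fun w => PySem.Dict.getD pvReplB w w) := by
  simp only [pvReplA, List.foldl_cons, List.foldl_nil, List.map_map]
  refine List.map_congr_left fun s _ => ?_
  simp only [Function.comp_apply]
  rcases eq_or_ne s "i" with rfl | h1; · decide
  rcases eq_or_ne s "am" with rfl | h2; · decide
  rcases eq_or_ne s "me" with rfl | h3; · decide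
  rcases eq_or_ne s "mine" with rfl | h4; · decide
  rcases eq_or_ne s "my" with rfl | h5; · decide
  rcases eq_or_ne s "myself" with rfl | h6; · decide
  rcases eq_or_ne s "because" with rfl | h7; · decide
  have e1 : ("i" == s) = false := by simp [Ne.symm h1]
  have e2 : ("am" == s) = false := by simp [Ne.symm h2]
  have e3 : ("me" == s) = false := by simp [Ne.symm h3]
  have e4 : ("mine" == s) = false := by simp [Ne.symm h4]
  have e5 : ("my" == s) = false := by simp [Ne.symm h5]
  have e6 : ("myself" == s) = false := by simp [Ne.symm h6]
  have e7 : ("because" == s) = false := by simp [Ne.symm h7]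
  simp [pvReplB, PySem.Dict.getD, PySem.Dict.get?, List.find?, h1, h2, h3, h4, h5, h6, h7,
    e1, e2, e3, e4, e5, e6, e7]

-- B's recursive builder produces exactly " ".join of the per-word replacements.
theorem pvRewritten_eq (l : List String) :
    pvRewritten l = PySem.Str.join " " (l.map (fun w => PySem.Dict.getD pvReplB w w)) := by
  induction l with
  | nil => rfl
  | cons w rest ih =>
    cases rest with
    | nil =>
      apply String.toList_injective
      simp [pvRewritten, PySem.Chars.join, List.intercalate]
    | cons y t =>
      apply String.toList_injective
      simp only [pvRewritten, ih, List.map_cons, PySem.Str.toList_join]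
      simp [PySem.Chars.join, List.intercalate, List.intersperse]

-- ===== VERDICT (by name: the statement is the Claim_ definition above) =====
theorem generate_why_question_spec : Claim_equal_generate_why_question := by
  intro response _ _
  unfold Spec_generate_why_question generate_why_question generate_why_question_alt
  simp only [pvGuard, pvQGuard, pvFold_eq, pvRewritten_eq]
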